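-- pv_equiv track=rewrite | github.com/jachilag/python_ciclo1_mintic2022 | reto_5v2.py | puedocambiar
-- ===== SOURCE A (Python) =====
-- def puedocambiar(otrosFiguritas,misFiguritas):
--     salida = 0
--     for i in misFiguritas:
--         if not i in otrosFiguritas:
--             salida += 1
--     salida2 = 0
--     for i in otrosFiguritas:
--         if not i in misFiguritas:
--             salida2 += 1
--
--     return min(salida,salida2)
-- ===== SOURCE B (Python) =====
-- def _tally(xs):
--     d = {}
--     for x in xs:
--         d[x] = d.get(x, 0) + 1
--     return d
--
-- def puedocambiar(otrosFiguritas, misFiguritas):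
--     cmi = _tally(misFiguritas)
--     cot = _tally(otrosFiguritas)
--     salida = sum(c for x, c in cmi.items() if x not in cot)
--     salida2 = sum(c for x, c in cot.items() if x not in cmi)
--     return min(salida, salida2)
-- ===== Notes on version B (the rewrite author's own statement) =====
-- stated objective: faster
-- what changed: Replaces the two flat per-element loops with linear-scan membership by frequency dictionaries built once per list, then sums multiplicities of keys absent from the other dict.
import Mathlib
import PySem

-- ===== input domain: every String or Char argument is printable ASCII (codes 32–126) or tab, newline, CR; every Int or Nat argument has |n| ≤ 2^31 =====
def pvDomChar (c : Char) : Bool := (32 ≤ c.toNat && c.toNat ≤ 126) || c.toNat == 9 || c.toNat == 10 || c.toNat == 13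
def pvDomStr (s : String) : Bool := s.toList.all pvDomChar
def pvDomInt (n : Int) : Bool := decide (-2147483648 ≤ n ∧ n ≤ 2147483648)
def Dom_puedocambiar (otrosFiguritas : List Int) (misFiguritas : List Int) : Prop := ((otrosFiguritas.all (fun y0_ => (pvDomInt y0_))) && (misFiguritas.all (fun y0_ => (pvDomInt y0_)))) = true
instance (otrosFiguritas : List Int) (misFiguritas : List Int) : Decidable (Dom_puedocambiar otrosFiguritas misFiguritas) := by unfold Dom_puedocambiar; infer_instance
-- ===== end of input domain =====

-- B builds a frequency dictionary for each list once and sums multiplicities of keys absent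
-- from the other dictionary, replacing A's per-element linear membership scans (faster).


-- ===== PORT A =====
def puedocambiar (otrosFiguritas : List Int) (misFiguritas : List Int) : Int :=
  let salida : Int :=
    misFiguritas.foldl (fun acc i => if !(otrosFiguritas.contains i) then acc + 1 else acc) 0
  let salida2 : Int :=
    otrosFiguritas.foldl (fun acc i => if !(misFiguritas.contains i) then acc + 1 else acc) 0
  min salida salida2

-- ===== PORT B =====
-- d[x] = d.get(x, 0) + 1 over a dict, as in Source B's _tally
def tallyB (xs : List Int) : PySem.Dict Int Int :=
  xs.foldl (fun d x => d.insert x (d.getD x 0 + 1)) PySem.Dict.empty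

def puedocambiar_alt (otrosFiguritas : List Int) (misFiguritas : List Int) : Int :=
  let cmi := tallyB misFiguritas
  let cot := tallyB otrosFiguritas
  let salida : Int := ((cmi.items.filter (fun q => !(cot.contains q.1))).map (·.2)).sum
  let salida2 : Int := ((cot.items.filter (fun q => !(cmi.contains q.1))).map (·.2)).sum
  min salida salida2

-- ===== PRECONDITION & SPEC =====
def Spec_puedocambiar (otrosFiguritas : List Int) (misFiguritas : List Int) (out : Int) : Prop := out = puedocambiar_alt otrosFiguritas misFiguritas
instance (otrosFiguritas : List Int) (misFiguritas : List Int) (out : Int) : Decidable (Spec_puedocambiar otrosFiguritas misFiguritas out) := by unfold Spec_puedocambiar; infer_instance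

-- ===== CLAIM (what is proved, stated in full; the proofs are below) =====
def Claim_equal_puedocambiar : Prop := ∀ (otrosFiguritas : List Int) (misFiguritas : List Int), Dom_puedocambiar otrosFiguritas misFiguritas → Spec_puedocambiar otrosFiguritas misFiguritas (puedocambiar otrosFiguritas misFiguritas)

-- ===== LEMMAS AND PROOFS =====

-- summing the multiplicities of a nodup key list T counts the occurrences in xs of members of T
theorem sum_count_nodup (xs T : List Int) (hT : T.Nodup) :
    (T.map (fun k => (xs.count k : Int))).sum = (xs.countP (fun i => T.contains i) : Int) := by
  induction xs with
  | nil => simp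
  | cons x xs ih =>
    have hcnt : (T.map (fun k => ((x :: xs).count k : Int)))
        = T.map (fun k => (xs.count k : Int) + (if k == x then 1 else 0)) := by
      apply List.map_congr_left
      intro k _
      by_cases h : k = x
      · subst h; simp
      · have h' : ¬x = k := fun hh => h hh.symm
        simp [h, h']
    rw [hcnt, PySem.List.sum_map_add_int, ih, PySem.List.sum_map_ite_one_zero]
    have hTx : (T.countP (fun k => k == x) : Int) = (if T.contains x then 1 else 0) := by
      have : T.countP (fun k => k == x) = T.count x := rfl
      rw [this]
      by_cases hx : x ∈ T
      · simp [List.count_eq_one_of_mem hT hx, hx]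
      · simp [List.count_eq_zero_of_not_mem hx, hx]
    rw [hTx, List.countP_cons]
    by_cases hx : x ∈ T <;> simp [hx]

-- one side of B equals the corresponding countP of the raw list
theorem side_eq (ys xs : List Int) :
    (((tallyB xs).items.filter (fun q => !((tallyB ys).contains q.1))).map (·.2)).sum
      = (xs.countP (fun i => !(ys.contains i)) : Int) := by
  have htx : tallyB xs = PySem.Dict.counter xs := PySem.Dict.foldl_insert_getD_add_one_eq_counter xs
  have hty : tallyB ys = PySem.Dict.counter ys := PySem.Dict.foldl_insert_getD_add_one_eq_counter ys
  rw [htx, hty, PySem.Dict.items_counter]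
  simp only [PySem.Dict.contains_counter]
  rw [List.filter_map, List.map_map]
  simp only [Function.comp_def]
  have hnd : ((PySem.Set.ofList xs).filter (fun k => !(ys.contains k))).Nodup :=
    (PySem.Set.nodup_ofList xs).filter _
  have := sum_count_nodup xs ((PySem.Set.ofList xs).filter (fun k => !(ys.contains k))) hnd
  rw [this]
  congr 1
  apply List.countP_congr
  intro i hi
  have hmem : i ∈ PySem.Set.ofList xs := (PySem.Set.mem_ofList xs i).mpr hi
  by_cases h : i ∈ ys <;>
    simp [List.mem_filter, hmem, h]

-- A's foldl counters are the same countP values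
theorem a_side (ys xs : List Int) :
    xs.foldl (fun acc i => if !(ys.contains i) then acc + 1 else acc) (0 : Int)
      = (xs.countP (fun i => !(ys.contains i)) : Int) := by
  rw [PySem.List.foldl_count_if (fun i => !(ys.contains i)) xs 0]
  simp

-- ===== VERDICT (by name: the statement is the Claim_ definition above) =====
theorem puedocambiar_spec : Claim_equal_puedocambiar := by
  intro o m _
  unfold Spec_puedocambiar
  simp only [puedocambiar, puedocambiar_alt]
  rw [side_eq o m, side_eq m o, a_side o m, a_side m o]
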